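-- pv_equiv track=rewrite | github.com/MohammedFaadil/Prudent | w2-analyzer-project/task1_price_gap/price_gap.py | find_price_gap_pair
-- ===== SOURCE A (Python) =====
-- from typing import List, Tuple, Optional
--
-- def find_price_gap_pair(nums: List[int], k: int) -> Optional[Tuple[int, int]]:
--     """
--     Return indices (i, j) with i < j and abs(nums[i] - nums[j]) == k.
--     If multiple exist, return the lexicographically smallest pair.
--     If none, return None.
--     """
--     if not nums or len(nums) < 2:
--         return None
--
--     # Dictionary to store the first occurrence of each value
--     value_to_index = {}
--
--     # Initialize with a large j value to find smallest pairs
--     best_pair = None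
--
--     for j, num in enumerate(nums):
--         # Check for two possible differences: num - target = k or target - num = k
--         # Which means target = num - k or target = num + k
--
--         # Check for num - k
--         target1 = num - k
--         if target1 in value_to_index:
--             i = value_to_index[target1]
--             candidate = (i, j)
--             if best_pair is None or candidate < best_pair:
--                 best_pair = candidate
--
--         # Check for num + k
--         target2 = num + k
--         if target2 in value_to_index:
--             i = value_to_index[target2]
--             candidate = (i, j)
--             if best_pair is None or candidate < best_pair:
--                 best_pair = candidate
--
--         # Store the first occurrence of this number
--         if num not in value_to_index:
--             value_to_index[num] = j
--
--     return best_pair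
-- ===== SOURCE B (Python) =====
-- from typing import List, Tuple, Optional
--
-- def find_price_gap_pair(nums: List[int], k: int) -> Optional[Tuple[int, int]]:
--     n = len(nums)
--     for i in range(n):
--         for j in range(i + 1, n):
--             if nums[i] - nums[j] == k or nums[j] - nums[i] == k:
--                 return (i, j)
--     return None
-- ===== Notes on version B (the rewrite author's own statement) =====
-- stated objective: simpler
-- what changed: Replaced the dict-of-first-occurrences single pass with candidate tracking by a plain nested loop that returns the first matching pair, which is automatically the lexicographically smallest; the gap test checks both directed differences, exactly matching A's two-target lookup for every k (including negative k).
import Mathlib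
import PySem

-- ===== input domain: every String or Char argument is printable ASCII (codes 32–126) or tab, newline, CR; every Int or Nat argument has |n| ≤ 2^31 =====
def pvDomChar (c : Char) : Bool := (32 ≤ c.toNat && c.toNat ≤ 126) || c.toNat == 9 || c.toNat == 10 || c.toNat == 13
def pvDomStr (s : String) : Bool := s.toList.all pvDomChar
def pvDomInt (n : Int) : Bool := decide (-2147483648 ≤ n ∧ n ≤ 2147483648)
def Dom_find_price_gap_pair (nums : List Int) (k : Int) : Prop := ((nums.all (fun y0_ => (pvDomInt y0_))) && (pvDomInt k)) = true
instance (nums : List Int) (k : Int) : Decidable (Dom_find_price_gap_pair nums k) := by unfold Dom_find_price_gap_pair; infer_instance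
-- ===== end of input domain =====

-- B replaces A's dict-of-first-occurrences pass with candidate tracking by a plain
-- nested loop returning the first (hence lexicographically smallest) matching pair; simpler, not faster.

-- ===== PORT A =====
-- 'if best_pair is None or candidate < best_pair: best_pair = candidate' (used twice in A)
def pvUpd (b : Option (Int × Int)) (c : Int × Int) : Option (Int × Int) :=
  match b with
  | none => some c
  | some bp => if c.1 < bp.1 ∨ (c.1 = bp.1 ∧ c.2 < bp.2) then some c else some bp

-- one iteration of A's 'for j, num in enumerate(nums)' loop body; state = (value_to_index, best_pair)
def pvStepA (k : Int) (st : PySem.Dict Int Int × Option (Int × Int)) (e : Int × Int) :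
    PySem.Dict Int Int × Option (Int × Int) :=
  let d := st.1
  let j := e.1
  let num := e.2
  let best1 := match d.get? (num - k) with
    | some i => pvUpd st.2 (i, j)
    | none => st.2
  let best2 := match d.get? (num + k) with
    | some i => pvUpd best1 (i, j)
    | none => best1
  let d' := if d.contains num then d else d.insert num j
  (d', best2)

def find_price_gap_pair (nums : List Int) (k : Int) : Option (Int × Int) :=
  if nums = [] ∨ nums.length < 2 then none
  else ((PySem.List.enumerate nums).foldl (pvStepA k) (PySem.Dict.empty, none)).2

-- ===== PORT B =====
-- nested index loops with early return; nums[i]/nums[j] are in range, so the getD default is never used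
def find_price_gap_pair_alt (nums : List Int) (k : Int) : Option (Int × Int) :=
  let n : Int := (nums.length : Int)
  (PySem.List.pyRange 0 n 1).findSome? (fun i =>
    (PySem.List.pyRange (i + 1) n 1).findSome? (fun j =>
      if PySem.List.pyGetD nums i 0 - PySem.List.pyGetD nums j 0 = k ∨
         PySem.List.pyGetD nums j 0 - PySem.List.pyGetD nums i 0 = k
      then some (i, j) else none))

-- ===== PRECONDITION & SPEC =====
def Spec_find_price_gap_pair (nums : List Int) (k : Int) (out : Option (Int × Int)) : Prop := out = find_price_gap_pair_alt nums k
instance (nums : List Int) (k : Int) (out : Option (Int × Int)) : Decidable (Spec_find_price_gap_pair nums k out) := by unfold Spec_find_price_gap_pair; infer_instance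

-- ===== CLAIM (what is proved, stated in full; the proofs are below) =====
def Claim_equal_find_price_gap_pair : Prop := ∀ (nums : List Int) (k : Int), Dom_find_price_gap_pair nums k → Spec_find_price_gap_pair nums k (find_price_gap_pair nums k)

-- ===== LEMMAS AND PROOFS =====

-- a matching pair of indices, as the Int pair the programs return
def pvMP (nums : List Int) (k : Int) (p : Int × Int) : Prop :=
  0 ≤ p.1 ∧ p.1 < p.2 ∧ p.2 < (nums.length : Int) ∧
  (PySem.List.pyGetD nums p.1 0 - PySem.List.pyGetD nums p.2 0 = k ∨
   PySem.List.pyGetD nums p.2 0 - PySem.List.pyGetD nums p.1 0 = k)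

def pvLe (p q : Int × Int) : Prop := p.1 < q.1 ∨ (p.1 = q.1 ∧ p.2 ≤ q.2)

-- 'b is the lexicographic minimum of the set Q (none iff Q is empty)'
def pvMin (b : Option (Int × Int)) (Q : Int × Int → Prop) : Prop :=
  (b = none → ∀ p, ¬ Q p) ∧ ∀ p, b = some p → Q p ∧ ∀ q, Q q → pvLe p q

lemma pvMin_congr {b : Option (Int × Int)} {Q Q' : Int × Int → Prop}
    (h : pvMin b Q) (hiff : ∀ p, Q p ↔ Q' p) : pvMin b Q' := by
  obtain ⟨h1, h2⟩ := h
  exact ⟨fun hb p hp => h1 hb p ((hiff p).2 hp),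
    fun p hp => ⟨(hiff p).1 (h2 p hp).1, fun q hq => (h2 p hp).2 q ((hiff q).2 hq)⟩⟩

lemma pvMin_upd {b : Option (Int × Int)} {Q : Int × Int → Prop} (h : pvMin b Q) (c : Int × Int) :
    pvMin (pvUpd b c) (fun p => Q p ∨ p = c) := by
  obtain ⟨h1, h2⟩ := h
  constructor
  · intro hb
    cases b
    · simp [pvUpd] at hb
    · simp only [pvUpd] at hb
      split at hb <;> simp at hb
  · intro p hp
    cases hb : b with
    | none =>
      simp [pvUpd, hb] at hp
      subst hp
      refine ⟨Or.inr rfl, fun q hq => ?_⟩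
      cases hq with
      | inl hq => exact absurd hq (h1 hb q)
      | inr hq => subst hq; exact Or.inr ⟨rfl, le_refl _⟩
    | some bp =>
      obtain ⟨hbp, hmin⟩ := h2 bp hb
      simp only [pvUpd, hb] at hp
      split at hp
      · rename_i hlt
        simp at hp; subst hp
        refine ⟨Or.inr rfl, fun q hq => ?_⟩
        cases hq with
        | inl hq =>
          have := hmin q hq
          unfold pvLe at *; omega
        | inr hq => subst hq; exact Or.inr ⟨rfl, le_refl _⟩
      · rename_i hnlt
        simp at hp; subst hp
        refine ⟨Or.inl hbp, fun q hq => ?_⟩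
        cases hq with
        | inl hq => exact hmin q hq
        | inr hq => subst hq; unfold pvLe; omega

lemma pvMin_weaken {b : Option (Int × Int)} {R S : Int × Int → Prop}
    (h : pvMin b R) (h1 : ∀ p, R p → S p) (h2 : ∀ p, S p → ∃ q, R q ∧ pvLe q p) :
    pvMin b S := by
  obtain ⟨hn, hs⟩ := h
  constructor
  · intro hb p hp
    obtain ⟨q, hq, _⟩ := h2 p hp
    exact hn hb q hq
  · intro p hp
    obtain ⟨hR, hmin⟩ := hs p hp
    refine ⟨h1 p hR, fun q hq => ?_⟩
    obtain ⟨r, hr, hrq⟩ := h2 q hq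
    have := hmin r hr
    unfold pvLe at *; omega

-- first occurrence of a value among indices < anything that contains one
lemma pvFirstOcc {nums : List Int} {v : Int} (i : Nat) (h : nums.getD i 0 = v) :
    ∃ t : Nat, t ≤ i ∧ nums.getD t 0 = v ∧ ∀ s : Nat, s < t → nums.getD s 0 ≠ v := by
  have hex : ∃ t : Nat, nums.getD t 0 = v := ⟨i, h⟩
  exact ⟨Nat.find hex, Nat.find_min' hex h, Nat.find_spec hex, fun s hs => Nat.find_min hex hs⟩

-- dict invariant: d maps each value to the index of its first occurrence among indices < m
def pvDI (nums : List Int) (d : PySem.Dict Int Int) (m : Nat) : Prop :=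
  ∀ v i : Int, d.get? v = some i ↔
    ∃ t : Nat, i = (t : Int) ∧ t < m ∧ nums.getD t 0 = v ∧ ∀ s : Nat, s < t → nums.getD s 0 ≠ v

lemma pvDI_lookup {nums : List Int} {d : PySem.Dict Int Int} {m : Nat} (hd : pvDI nums d m)
    {i : Nat} (hi : i < m) {v : Int} (hv : nums.getD i 0 = v) :
    ∃ t : Nat, d.get? v = some (t : Int) ∧ t ≤ i := by
  obtain ⟨t, ht1, ht2, ht3⟩ := pvFirstOcc i hv
  exact ⟨t, (hd v t).2 ⟨t, rfl, by omega, ht2, ht3⟩, ht1⟩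

lemma pvDI_step {nums : List Int} {d : PySem.Dict Int Int} {m : Nat} (hd : pvDI nums d m)
    (hm : m < nums.length) :
    pvDI nums (if d.contains (nums.getD m 0) then d else d.insert (nums.getD m 0) (m : Int)) (m + 1) := by
  set num := nums.getD m 0 with hnum
  by_cases hc : d.contains num
  · simp only [hc, if_true]
    intro v i
    constructor
    · intro h
      obtain ⟨t, ht⟩ := (hd v i).1 h
      exact ⟨t, ht.1, by omega, ht.2.2⟩
    · rintro ⟨t, rfl, htm, htv, htf⟩
      by_cases htm' : t < m
      · exact (hd v t).2 ⟨t, rfl, htm', htv, htf⟩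
      · -- t = m: v = num, but d contains num, so num occurs before m, contradicting firstness
        have htm2 : t = m := by omega
        subst htm2
        have : (d.get? num).isSome := by
          rw [← PySem.Dict.contains_eq_isSome_get?]; exact hc
        obtain ⟨i0, hi0⟩ := Option.isSome_iff_exists.1 this
        obtain ⟨t0, ht0e, ht0m, ht0v, _⟩ := (hd num i0).1 hi0
        exact absurd ht0v (htf t0 (by omega) ∘ (htv ▸ ·))
  · have hc' : d.contains num = false := by simpa using hc
    simp only [hc', Bool.false_eq_true, if_false]
    -- num has no occurrence before m
    have hnone : ∀ s : Nat, s < m → nums.getD s 0 ≠ num := by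
      intro s hs hv
      obtain ⟨t, ht, _⟩ := pvDI_lookup hd hs hv
      have : (d.get? num).isSome := by rw [ht]; rfl
      rw [← PySem.Dict.contains_eq_isSome_get?] at this
      simp [this] at hc
    intro v i
    rw [PySem.Dict.get?_insert]
    split
    · rename_i hv; subst hv
      constructor
      · intro h
        simp at h
        exact ⟨m, h.symm ▸ rfl, by omega, rfl, hnone⟩
      · rintro ⟨t, rfl, htm, htv, htf⟩
        have : t = m := by
          by_contra hne
          exact hnone t (by omega) htv
        subst this; rfl
    · rename_i hv
      constructor
      · intro h
        obtain ⟨t, ht⟩ := (hd v i).1 h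
        exact ⟨t, ht.1, by omega, ht.2.2⟩
      · rintro ⟨t, rfl, htm, htv, htf⟩
        have htm' : t < m := by
          by_contra h'
          have : t = m := by omega
          subst this
          exact hv htv.symm
        exact (hd v t).2 ⟨t, rfl, htm', htv, htf⟩

-- Q at stage m: matching pairs whose second index is below m
def pvQ (nums : List Int) (k : Int) (m : Nat) (p : Int × Int) : Prop :=
  pvMP nums k p ∧ p.2 < (m : Int)

lemma pvMP_nat {nums : List Int} {k : Int} {i j : Nat} :
    pvMP nums k ((i : Int), (j : Int)) ↔
      i < j ∧ j < nums.length ∧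
        (nums.getD i 0 - nums.getD j 0 = k ∨ nums.getD j 0 - nums.getD i 0 = k) := by
  simp only [pvMP, PySem.List.pyGetD_natCast]
  omega

lemma pvMin_optCand {b : Option (Int × Int)} {Q : Int × Int → Prop}
    (h : pvMin b Q) (r : Option Int) (m : Int) :
    pvMin (match r with | some i => pvUpd b (i, m) | none => b)
      (fun p => Q p ∨ ∃ i, r = some i ∧ p = (i, m)) := by
  cases r with
  | none => exact pvMin_congr h (by simp)
  | some i => exact pvMin_congr (pvMin_upd h (i, m)) (by simp)

-- the step of A's fold preserves the invariants
lemma pvStep_inv {nums : List Int} {k : Int} {d : PySem.Dict Int Int}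
    {b : Option (Int × Int)} {m : Nat}
    (hd : pvDI nums d m) (hb : pvMin b (pvQ nums k m)) (hm : m < nums.length) :
    pvDI nums (pvStepA k (d, b) ((m : Int), nums.getD m 0)).1 m.succ ∧
    pvMin (pvStepA k (d, b) ((m : Int), nums.getD m 0)).2 (pvQ nums k m.succ) := by
  set num := nums.getD m 0 with hnum
  constructor
  · -- dict part
    have := pvDI_step hd hm
    simp only [pvStepA]
    exact this
  · simp only [pvStepA]
    refine pvMin_weaken
      (pvMin_optCand (pvMin_optCand hb (d.get? (num - k)) (m : Int)) (d.get? (num + k)) (m : Int))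
      ?_ ?_
    · -- every candidate is a matching pair with snd < m+1
      rintro p ((h | h) | h)
      · exact ⟨h.1, by have := h.2; push_cast; omega⟩
      · -- hit on key num - k: the value num - k occurs first at some t < m
        obtain ⟨i, hi, hp⟩ := h
        obtain ⟨t, hit, htm, htv, _⟩ := (hd _ _).1 hi
        subst hp; subst hit
        refine ⟨pvMP_nat.2 ⟨htm, hm, Or.inr ?_⟩, by push_cast; omega⟩
        omega
      · obtain ⟨i, hi, hp⟩ := h
        obtain ⟨t, hit, htm, htv, _⟩ := (hd _ _).1 hi
        subst hp; subst hit
        refine ⟨pvMP_nat.2 ⟨htm, hm, Or.inl ?_⟩, by push_cast; omega⟩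
        omega
    · -- every matching pair with snd < m+1 is dominated by an element of the candidate set
      rintro p ⟨hmp, hp2⟩
      by_cases hold : p.2 < (m : Int)
      · exact ⟨p, Or.inl (Or.inl ⟨hmp, hold⟩), Or.inr ⟨rfl, le_refl _⟩⟩
      · -- p.2 = m: p = (i, m) matching; the dict holds the first occurrence t ≤ i of nums[i]
        obtain ⟨h0, hij, hjn, hk⟩ := hmp
        have hp2m : p.2 = (m : Int) := by push_cast at hp2; omega
        have hi0 : p.1 = ((p.1.toNat : Nat) : Int) := by omega
        set i := p.1.toNat with hidef
        have him : i < m := by omega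
        have hvi : PySem.List.pyGetD nums p.1 0 = nums.getD i 0 := by
          rw [hi0, PySem.List.pyGetD_natCast]
        have hvm : PySem.List.pyGetD nums p.2 0 = num := by
          rw [hp2m, PySem.List.pyGetD_natCast, hnum]
        cases hk with
        | inl hk =>
          -- nums[i] - num = k, i.e. nums[i] = num + k: r2 branch
          have : nums.getD i 0 = num + k := by rw [hvi, hvm] at hk; omega
          obtain ⟨t, ht, hti⟩ := pvDI_lookup hd him this
          refine ⟨((t : Int), (m : Int)), Or.inr ⟨t, ht, rfl⟩, ?_⟩
          unfold pvLe; simp; omega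
        | inr hk =>
          have : nums.getD i 0 = num - k := by rw [hvi, hvm] at hk; omega
          obtain ⟨t, ht, hti⟩ := pvDI_lookup hd him this
          refine ⟨((t : Int), (m : Int)), Or.inl (Or.inr ⟨t, ht, rfl⟩), ?_⟩
          unfold pvLe; simp; omega

-- the whole fold of A, by induction on the remaining suffix
lemma pvA_fold {nums : List Int} {k : Int} :
    ∀ (suf : List Int) (m : Nat) (d : PySem.Dict Int Int) (b : Option (Int × Int)),
      suf = nums.drop m → pvDI nums d m → pvMin b (pvQ nums k m) →
      pvMin ((PySem.List.enumerate suf (m : Int)).foldl (pvStepA k) (d, b)).2 (pvMP nums k) := by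
  intro suf
  induction suf with
  | nil =>
    intro m d b hsuf _ hb
    have hlen : nums.length ≤ m := by
      by_contra h
      have := List.drop_eq_nil_iff.1 hsuf.symm
      omega
    simp only [PySem.List.enumerate_nil, List.foldl_nil]
    refine pvMin_weaken hb (fun p hp => hp.1) (fun p hp => ⟨p, ⟨hp, ?_⟩, Or.inr ⟨rfl, le_refl _⟩⟩)
    have := hp.2.2.1
    omega
  | cons x rest ih =>
    intro m d b hsuf hd hb
    have hm : m < nums.length := by
      by_contra h
      rw [List.drop_eq_nil_of_le (by omega)] at hsuf
      exact (List.cons_ne_nil x rest) hsuf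
    have hx : x = nums.getD m 0 := by
      have h0 : (nums.drop m)[0]? = some x := by rw [← hsuf]; rfl
      rw [List.getElem?_drop, Nat.add_zero] at h0
      simp [List.getD_eq_getElem?_getD, h0]
    have hrest : rest = nums.drop (m + 1) := by
      have := congrArg (List.drop 1) hsuf
      simpa [List.drop_drop, Nat.add_comm] using this
    rw [PySem.List.enumerate_cons, List.foldl_cons]
    subst hx
    obtain ⟨hd', hb'⟩ := pvStep_inv hd hb hm
    have hcast : ((m : Int) + 1) = ((m + 1 : Nat) : Int) := by push_cast; ring
    rw [hcast]
    exact ih (m + 1) _ _ hrest hd' hb'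

-- characterization of A's result
lemma pvA_min (nums : List Int) (k : Int) :
    pvMin (find_price_gap_pair nums k) (pvMP nums k) := by
  unfold find_price_gap_pair
  split
  · rename_i h
    constructor
    · intro _ p hp
      obtain ⟨h0', h1, h2, _⟩ := hp
      rcases h with h | h
      · subst h; simp at h2; omega
      · omega
    · intro p hp; exact absurd hp (by simp)
  · have h0 : pvDI nums PySem.Dict.empty 0 := by
      intro v i
      constructor
      · intro h; simp [PySem.Dict.get?_empty] at h
      · rintro ⟨t, _, ht, _⟩; omega
    have hb0 : pvMin (none : Option (Int × Int)) (pvQ nums k 0) := by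
      refine ⟨fun _ p hp => ?_, fun p hp => by simp at hp⟩
      obtain ⟨⟨h1, h2, _, _⟩, h3⟩ := hp
      simp at h3
      omega
    have := pvA_fold (nums := nums) (k := k) nums 0 PySem.Dict.empty none (by simp) h0 hb0
    simpa using this

-- ---- B side ----

lemma pv_fs_aux {β : Type} (n : Int) (f : Int → Option β) (y : β) :
    ∀ (fuel : Nat) (a : Int), (n - a).toNat ≤ fuel →
      (PySem.List.pyRange a n 1).findSome? f = some y →
      ∃ j, a ≤ j ∧ j < n ∧ f j = some y ∧ ∀ j', a ≤ j' → j' < j → f j' = none := by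
  intro fuel
  induction fuel with
  | zero =>
    intro a hbound h
    have hna : n ≤ a := by omega
    rw [PySem.List.pyRange_one_eq_nil hna] at h
    simp at h
  | succ fl ih =>
    intro a hbound h
    by_cases hna : n ≤ a
    · rw [PySem.List.pyRange_one_eq_nil hna] at h; simp at h
    · have hlt : a < n := by omega
      rw [PySem.List.pyRange_one_cons hlt, List.findSome?_cons] at h
      cases hfa : f a with
      | some z =>
        rw [hfa] at h
        simp at h
        subst h
        exact ⟨a, le_refl a, hlt, hfa, fun j' h1 h2 => by omega⟩
      | none =>
        rw [hfa] at h
        obtain ⟨j, hj1, hj2, hj3, hj4⟩ := ih (a + 1) (by omega) h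
        refine ⟨j, by omega, hj2, hj3, fun j' ha' hb' => ?_⟩
        by_cases hje : j' = a
        · subst hje; exact hfa
        · exact hj4 j' (by omega) hb'

lemma pv_findSome?_range_some {β : Type} {n : Int} {f : Int → Option β} {y : β} {a : Int}
    (h : (PySem.List.pyRange a n 1).findSome? f = some y) :
    ∃ j, a ≤ j ∧ j < n ∧ f j = some y ∧ ∀ j', a ≤ j' → j' < j → f j' = none :=
  pv_fs_aux n f y (n - a).toNat a (le_refl _) h

lemma pv_findSome?_range_none {β : Type} {n : Int} {f : Int → Option β} {a : Int} :
    (PySem.List.pyRange a n 1).findSome? f = none ↔ ∀ j, a ≤ j → j < n → f j = none := by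
  rw [List.findSome?_eq_none_iff]
  constructor
  · intro h j h1 h2
    exact h j (PySem.List.mem_pyRange_one.2 ⟨h1, h2⟩)
  · intro h j hj
    obtain ⟨h1, h2⟩ := PySem.List.mem_pyRange_one.1 hj
    exact h j h1 h2

-- B's inner test, matched against pvMP
lemma pvB_min (nums : List Int) (k : Int) :
    pvMin (find_price_gap_pair_alt nums k) (pvMP nums k) := by
  unfold find_price_gap_pair_alt
  simp only []
  constructor
  · intro hnone p hp
    obtain ⟨p1, p2⟩ := p
    obtain ⟨h0, hij, hjn, hk⟩ := hp
    rw [pv_findSome?_range_none] at hnone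
    have hinner := hnone p1 h0 (by omega)
    rw [pv_findSome?_range_none] at hinner
    have := hinner p2 (by omega) hjn
    rw [if_pos hk] at this
    simp at this
  · intro p hp
    obtain ⟨i, hi0, hin, hisome, himin⟩ := pv_findSome?_range_some hp
    obtain ⟨j, hj1, hj2, hjsome, hjmin⟩ := pv_findSome?_range_some hisome
    by_cases hc : PySem.List.pyGetD nums i 0 - PySem.List.pyGetD nums j 0 = k ∨
        PySem.List.pyGetD nums j 0 - PySem.List.pyGetD nums i 0 = k
    case neg => rw [if_neg hc] at hjsome; simp at hjsome
    rw [if_pos hc] at hjsome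
    have hpij : p = (i, j) := by
      have := Option.some.inj hjsome
      exact this.symm
    subst hpij
    refine ⟨⟨hi0, by omega, hj2, hc⟩, fun q hq => ?_⟩
    obtain ⟨q1, q2⟩ := q
    obtain ⟨hq0, hqij, hqjn, hqk⟩ := hq
    by_cases hqi : q1 < i
    · -- the outer loop already scanned i' = q1 and its inner loop found nothing
      have h1 := himin q1 hq0 hqi
      rw [pv_findSome?_range_none] at h1
      have := h1 q2 (by omega) hqjn
      rw [if_pos hqk] at this
      simp at this
    · by_cases hqie : q1 = i
      · -- same first index: j is the first matching second index
        subst hqie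
        by_cases hqj : q2 < j
        · have := hjmin q2 (by omega) hqj
          rw [if_pos hqk] at this
          simp at this
        · exact Or.inr ⟨rfl, by omega⟩
      · exact Or.inl (by omega)

-- ===== VERDICT (by name: the statement is the Claim_ definition above) =====
theorem find_price_gap_pair_spec : Claim_equal_find_price_gap_pair := by
  intro nums k _
  unfold Spec_find_price_gap_pair
  obtain ⟨hAn, hAs⟩ := pvA_min nums k
  obtain ⟨hBn, hBs⟩ := pvB_min nums k
  cases hA : find_price_gap_pair nums k with
  | none =>
    cases hB : find_price_gap_pair_alt nums k with
    | none => rfl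
    | some q => exact absurd (hBs q hB).1 (hAn hA q)
  | some p =>
    cases hB : find_price_gap_pair_alt nums k with
    | none => exact absurd (hAs p hA).1 (hBn hB p)
    | some q =>
      obtain ⟨hpM, hpmin⟩ := hAs p hA
      obtain ⟨hqM, hqmin⟩ := hBs q hB
      have h1 := hpmin q hqM
      have h2 := hqmin p hpM
      unfold pvLe at h1 h2
      have : p = q := by
        obtain ⟨p1, p2⟩ := p; obtain ⟨q1, q2⟩ := q
        simp_all; omega
      rw [this]
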